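-- pv_equiv track=rewrite | github.com/Aasthaengg/IBMdataset | Python_codes/p03014/s611043766.py | len_count
-- ===== SOURCE A (Python) =====
-- def len_count(S):
--     H, W = len(S), len(S[0])
--     L = [[0] * W for _ in range(H)]
--     for row_S, row_L in zip(S, L):
--         vec = [1]
--         for i in range(1, W):
--             if row_S[i - 1] == row_S[i]:
--                 vec[-1] += 1
--             else:
--                 vec.append(1)
--
--         idx = 0
--         valid = row_S[0] == '.'
--         for n in vec:
--             if valid:
--                 for i in range(idx, idx + n):
--                     row_L[i] = n
--             idx += n
--             valid = not valid
--
--     return L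
-- ===== SOURCE B (Python) =====
-- def len_count(S):
--     W = len(S[0])
--     out = []
--     for s in S:
--         left = [0] * W
--         ok = [False] * W
--         valid = s[0] == '.'
--         run = 0
--         for i in range(W):
--             if i > 0 and s[i] != s[i - 1]:
--                 run = 1
--                 valid = not valid
--             else:
--                 run += 1
--             left[i] = run
--             ok[i] = valid
--         res = [0] * W
--         right = 0
--         for i in range(W - 1, -1, -1):
--             if i < W - 1 and s[i] != s[i + 1]:
--                 right = 1
--             else:
--                 right += 1
--             if ok[i]:
--                 res[i] = left[i] + right - 1
--         out.append(res)
--     return out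
-- ===== Notes on version B (the rewrite author's own statement) =====
-- stated objective: alternative
-- what changed: A detects runs into an explicit run-length list per row and then back-fills each alternating 'valid' run into a preallocated row by index ranges; B instead makes a forward sweep (consecutive-run counter and validity flag per cell) and a backward sweep (run length to the right), combining them cell-by-cell as left+right-1, with no run list and no range fill.
import Mathlib
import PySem

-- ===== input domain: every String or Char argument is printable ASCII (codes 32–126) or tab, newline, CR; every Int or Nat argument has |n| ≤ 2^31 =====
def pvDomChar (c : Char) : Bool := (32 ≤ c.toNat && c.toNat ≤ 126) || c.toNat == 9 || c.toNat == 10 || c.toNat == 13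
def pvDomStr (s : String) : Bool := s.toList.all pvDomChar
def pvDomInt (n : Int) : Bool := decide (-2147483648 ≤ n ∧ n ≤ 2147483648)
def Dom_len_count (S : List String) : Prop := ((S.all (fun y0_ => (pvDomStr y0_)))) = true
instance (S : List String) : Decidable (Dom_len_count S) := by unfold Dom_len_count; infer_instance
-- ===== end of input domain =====

-- B replaces A's per-row "build a run-length list, then back-fill each alternating valid run
-- by index ranges" with two directional sweeps combined cell-by-cell (alternative decomposition,
-- same asymptotic cost). Equivalence is about the return value (A mutates only its own fresh L).

-- ===== PORT A =====
-- A's inner loop "for i in range(1, W): if row_S[i-1]==row_S[i]: vec[-1]+=1 else vec.append(1)"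
-- walks the adjacent pairs of the first W characters; under Pre_ every row has ≥ W ≥ 1 chars,
-- so the port passes each row's first-W character list (p :: rest) to the row worker.
def pvVecLoopA (vec : List Int) (prev : Char) : List Char → List Int
  | [] => vec
  | c :: cs =>
    if prev == c then pvVecLoopA (vec.dropLast ++ [vec.getLast! + 1]) c cs
    else pvVecLoopA (vec ++ [1]) c cs

-- "for i in range(idx, idx + n): row_L[i] = n"
def pvSetRangeA (L : List Int) (idx : Nat) (n : Nat) (v : Int) : List Int :=
  match n with
  | 0 => L
  | m + 1 => pvSetRangeA (L.set idx v) (idx + 1) m v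

-- "for n in vec: if valid: fill; idx += n; valid = not valid"
def pvFillLoopA (L : List Int) (idx : Nat) (valid : Bool) : List Int → List Int
  | [] => L
  | n :: vec => pvFillLoopA (if valid then pvSetRangeA L idx n.toNat n else L) (idx + n.toNat) (!valid) vec

def pvRowA (t : List Char) : List Int :=
  match t with
  | [] => []          -- unreachable under Pre_ (Python A raises IndexError when W = 0 or a row is shorter than W)
  | p :: rest =>
    let vec := pvVecLoopA [1] p rest
    pvFillLoopA (List.replicate (rest.length + 1) 0) 0 (p == '.') vec

def len_count (S : List String) : List (List Int) :=
  let W := (S.headD "").toList.length        -- W = len(S[0]); S = [] raises in Python, excluded by Pre_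
  S.map (fun s => pvRowA (s.toList.take W))  -- zip(S, L) with in-place row mutation = map over rows

-- ===== PORT B =====
-- forward sweep of Source B: per cell, the consecutive-equal run counter and the validity flag
-- (flag flips at each character change); cell 0 is seeded by the caller.
def pvFwdB (prev : Char) (run : Int) (valid : Bool) : List Char → List (Char × Int × Bool)
  | [] => []
  | c :: cs =>
    if c != prev then (c, 1, !valid) :: pvFwdB c 1 (!valid) cs
    else (c, run + 1, valid) :: pvFwdB c (run + 1) valid cs

-- backward sweep of Source B: right-to-left, carry the run length to the right and emit
-- left + right - 1 for valid cells, 0 otherwise; returns (res, right-counter at the head cell).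
def pvBwdB : List (Char × Int × Bool) → List Int × Int
  | [] => ([], 0)
  | [(_, l, ok)] => ([if ok then l + 1 - 1 else 0], 1)
  | (c, l, ok) :: (c', l', ok') :: rest =>
    let pr := pvBwdB ((c', l', ok') :: rest)
    let r' : Int := if c == c' then pr.2 + 1 else 1
    ((if ok then l + r' - 1 else 0) :: pr.1, r')

def pvRowB (t : List Char) : List Int :=
  match t with
  | [] => []          -- unreachable under Pre_, as in port A
  | p :: rest =>
    let v := p == '.'
    (pvBwdB ((p, 1, v) :: pvFwdB p 1 v rest)).1

def len_count_alt (S : List String) : List (List Int) :=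
  let W := (S.headD "").toList.length
  S.map (fun s => pvRowB (s.toList.take W))

-- ===== PRECONDITION & SPEC =====
-- Pre_ excludes exactly the inputs where Python A raises IndexError: S = [] (S[0]),
-- W = len(S[0]) = 0 (row_S[0]), or some row shorter than W (row_S[i]); B raises there too.
def Pre_len_count (S : List String) : Prop :=
  S ≠ [] ∧ 1 ≤ (S.headD "").toList.length ∧
    ∀ s ∈ S, (S.headD "").toList.length ≤ s.toList.length
instance (S : List String) : Decidable (Pre_len_count S) := by unfold Pre_len_count; infer_instance

def pvWitness_len_count : List String := ["..#", "#.#"]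

def Spec_len_count (S : List String) (out : List (List Int)) : Prop := out = len_count_alt S
instance (S : List String) (out : List (List Int)) : Decidable (Spec_len_count S out) := by unfold Spec_len_count; infer_instance

-- ===== CLAIM (what is proved, stated in full; the proofs are below) =====
def Claim_equal_len_count : Prop := ∀ (S : List String), Dom_len_count S → Pre_len_count S → Spec_len_count S (len_count S)

-- ===== LEMMAS AND PROOFS =====

-- run-length encoding of (p :: cs): the common characterisation of both row workers
def pvRle (p : Char) : List Char → List Nat
  | [] => [1]
  | c :: cs =>
    if p == c then
      match pvRle c cs with
      | [] => [1]
      | k :: ks => (k + 1) :: ks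
    else 1 :: pvRle c cs

-- the intended per-row output: each run of length n contributes n copies of n (valid) or of 0,
-- the flag alternating run by run
def pvAltOut (valid : Bool) : List Nat → List Int
  | [] => []
  | n :: rs => (if valid then List.replicate n (n : Int) else List.replicate n 0) ++ pvAltOut (!valid) rs

theorem pvRle_ne_nil (p : Char) (cs : List Char) : pvRle p cs ≠ [] := by
  induction cs generalizing p with
  | nil => simp [pvRle]
  | cons c cs ih =>
    simp only [pvRle]
    split
    · rcases h : pvRle c cs with _ | ⟨k, ks⟩ <;> simp
    · simp

theorem pvRle_sum (p : Char) (cs : List Char) : (pvRle p cs).sum = cs.length + 1 := by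
  induction cs generalizing p with
  | nil => simp [pvRle]
  | cons c cs ih =>
    simp only [pvRle]
    split
    · rcases h : pvRle c cs with _ | ⟨k, ks⟩
      · exact absurd h (pvRle_ne_nil c cs)
      · have := ih c; rw [h] at this; simp at this ⊢; omega
    · simp only [List.sum_cons, ih c, List.length_cons]; omega

theorem pvGetLast!_concat (v : List Int) (k : Int) : (v ++ [k]).getLast! = k := by
  cases v <;> simp [List.getLast!]

theorem pvVecLoopA_append (cs : List Char) : ∀ (prev : Char) (v : List Int) (k : Int),
    pvVecLoopA (v ++ [k]) prev cs = v ++ pvVecLoopA [k] prev cs := by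
  induction cs with
  | nil => intro prev v k; simp [pvVecLoopA]
  | cons c cs ih =>
    intro prev v k
    by_cases h : prev = c
    · simp only [pvVecLoopA, h, beq_self_eq_true, if_true, List.dropLast_concat,
        pvGetLast!_concat, show ([k] : List Int).dropLast = [] from rfl,
        show ([k] : List Int).getLast! = k from rfl, List.nil_append]
      exact ih c v (k + 1)
    · simp only [pvVecLoopA, beq_eq_false_iff_ne.mpr h, Bool.false_eq_true, if_false]
      rw [ih c (v ++ [k]) 1, ih c [k] 1]
      simp

theorem pvVecLoopA_eq_rle (cs : List Char) : ∀ (p : Char) (k : Int),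
    pvVecLoopA [k] p cs
      = (k - 1 + ((pvRle p cs).headI : Int)) :: (pvRle p cs).tail.map Int.ofNat := by
  induction cs with
  | nil => intro p k; simp [pvVecLoopA, pvRle]
  | cons c cs ih =>
    intro p k
    obtain ⟨h, t, hE⟩ := List.exists_cons_of_ne_nil (pvRle_ne_nil c cs)
    by_cases hc : p = c
    · simp only [pvVecLoopA, hc, beq_self_eq_true, if_true,
        show ([k] : List Int).dropLast = [] from rfl,
        show ([k] : List Int).getLast! = k from rfl, List.nil_append, pvRle, hE]
      rw [ih c (k + 1), hE]
      simp only [List.headI, List.tail]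
      exact List.cons_eq_cons.mpr ⟨by push_cast; ring, rfl⟩
    · simp only [pvVecLoopA, Bool.false_eq_true, if_false, pvRle,
        beq_eq_false_iff_ne.mpr hc]
      rw [pvVecLoopA_append cs c [k] 1,
        ih c 1, hE]
      simp only [List.headI, List.tail, List.singleton_append, List.map_cons]
      exact List.cons_eq_cons.mpr ⟨by push_cast; ring,
        List.cons_eq_cons.mpr ⟨by simp [Int.ofNat_eq_natCast], rfl⟩⟩

-- writing v at position done.length into the zero region
theorem pvSet_at_boundary (done : List Int) (z : Int) (rest : List Int) (v : Int) :
    (done ++ z :: rest).set done.length v = done ++ v :: rest := by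
  induction done with
  | nil => simp
  | cons d ds ih => simp [ih]

theorem pvSetRangeA_spec (n : Nat) : ∀ (done : List Int) (m : Nat) (v : Int), n ≤ m →
    pvSetRangeA (done ++ List.replicate m (0 : Int)) done.length n v
      = done ++ List.replicate n v ++ List.replicate (m - n) (0 : Int) := by
  induction n with
  | zero => intro done m v _; simp [pvSetRangeA]
  | succ n ih =>
    intro done m v hnm
    obtain ⟨m', rfl⟩ : ∃ m', m = m' + 1 := ⟨m - 1, by omega⟩
    simp only [pvSetRangeA, List.replicate_succ, pvSet_at_boundary]
    have h1 : done ++ v :: List.replicate m' (0 : Int)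
        = (done ++ [v]) ++ List.replicate m' (0 : Int) := by simp
    have h2 : done.length + 1 = (done ++ [v]).length := by simp
    rw [h1, h2, ih (done ++ [v]) m' v (by omega)]
    simp

theorem pvFillLoopA_spec (rs : List Nat) : ∀ (done : List Int) (valid : Bool),
    pvFillLoopA (done ++ List.replicate rs.sum (0 : Int)) done.length valid
        (rs.map Int.ofNat)
      = done ++ pvAltOut valid rs := by
  induction rs with
  | nil => intro done valid; simp [pvFillLoopA, pvAltOut]
  | cons n rs ih =>
    intro done valid
    simp only [List.map_cons, pvFillLoopA, List.sum_cons, pvAltOut, Int.ofNat_eq_natCast,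
      Int.toNat_natCast]
    cases valid with
    | true =>
      simp only [if_true]
      rw [pvSetRangeA_spec n done (n + rs.sum) (n : Int) (by omega)]
      have : n + rs.sum - n = rs.sum := by omega
      rw [this, List.append_assoc]
      have h2 : done.length + n = (done ++ List.replicate n ((n : Int))).length := by simp
      rw [← List.append_assoc (done) (List.replicate n ((n:Int))), h2,
        ih (done ++ List.replicate n ((n : Int))) (!true)]
      simp
    | false =>
      simp only [Bool.false_eq_true, if_false]
      have h1 : List.replicate (n + rs.sum) (0 : Int)
          = List.replicate n (0 : Int) ++ List.replicate rs.sum (0 : Int) := by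
        rw [List.replicate_add]
      have h2 : done.length + n = (done ++ List.replicate n ((0 : Int))).length := by simp
      rw [h1, ← List.append_assoc, h2, ih (done ++ List.replicate n (0 : Int)) (!false)]
      simp

theorem pvRowA_eq_altOut (p : Char) (rest : List Char) :
    pvRowA (p :: rest) = pvAltOut (p == '.') (pvRle p rest) := by
  obtain ⟨h, t, hE⟩ := List.exists_cons_of_ne_nil (pvRle_ne_nil p rest)
  have hvec : pvVecLoopA [1] p rest = (pvRle p rest).map Int.ofNat := by
    rw [pvVecLoopA_eq_rle, hE]; simp
  have hsum : rest.length + 1 = (pvRle p rest).sum := (pvRle_sum p rest).symm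
  simp only [pvRowA, hvec, hsum]
  have := pvFillLoopA_spec (pvRle p rest) [] (p == '.')
  simpa using this

-- one unfolding step of the backward sweep on a two-or-more-cell list
theorem pvBwdB_cons_cons (a b : Char × Int × Bool) (L : List (Char × Int × Bool)) :
    pvBwdB (a :: b :: L)
      = ((if a.2.2 then a.2.1 + (if a.1 == b.1 then (pvBwdB (b :: L)).2 + 1 else 1) - 1 else 0)
          :: (pvBwdB (b :: L)).1,
         (if a.1 == b.1 then (pvBwdB (b :: L)).2 + 1 else 1)) := by
  obtain ⟨c, l, ok⟩ := a
  obtain ⟨c', l', ok'⟩ := b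
  simp [pvBwdB]

-- the combined two-sweep worker of B, characterised against the run decomposition:
-- on (p :: cs) whose head cell carries left-counter `run` and flag `valid`, the backward sweep
-- returns the alternating output (head run valued run + n₁ - 1) and the head run length n₁.
theorem pvBwdFwd_spec (cs : List Char) : ∀ (p : Char) (run : Int) (valid : Bool),
    pvBwdB ((p, run, valid) :: pvFwdB p run valid cs)
      = ((if valid then List.replicate (pvRle p cs).headI (run + ((pvRle p cs).headI : Int) - 1)
          else List.replicate (pvRle p cs).headI 0) ++ pvAltOut (!valid) (pvRle p cs).tail,
         ((pvRle p cs).headI : Int)) := by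
  induction cs with
  | nil =>
    intro p run valid
    cases valid <;> simp [pvFwdB, pvBwdB, pvRle, pvAltOut]
  | cons c cs ih =>
    intro p run valid
    obtain ⟨h, t, hE⟩ := List.exists_cons_of_ne_nil (pvRle_ne_nil c cs)
    by_cases hc : p = c
    · -- same run continues: counter run+1, same flag
      subst hc
      rw [show pvFwdB p run valid (p :: cs) = (p, run + 1, valid) :: pvFwdB p (run + 1) valid cs
          from by simp [pvFwdB]]
      rw [pvBwdB_cons_cons, ih p (run + 1) valid]
      have hR : pvRle p (p :: cs) = (h + 1) :: t := by simp [pvRle, hE]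
      rw [hR, hE]
      have e2 : run + 1 + (h : Int) - 1 = run + ((h : Int) + 1) - 1 := by ring
      cases valid <;> simp [List.replicate_succ, e2]
    · -- new run: counter resets to 1, flag flips
      rw [show pvFwdB p run valid (c :: cs) = (c, 1, !valid) :: pvFwdB c 1 (!valid) cs
          from by simp [pvFwdB, bne_iff_ne, Ne.symm hc]]
      rw [pvBwdB_cons_cons, ih c 1 (!valid)]
      have hR : pvRle p (c :: cs) = 1 :: (h :: t) := by simp [pvRle, hE, hc]
      rw [hR, hE]
      have e1 : ∀ x : Int, 1 + x - 1 = x := fun x => by ring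
      cases valid <;>
        simp [List.replicate_succ, pvAltOut, beq_eq_false_iff_ne.mpr hc, e1]

theorem pvRowB_eq_altOut (p : Char) (rest : List Char) :
    pvRowB (p :: rest) = pvAltOut (p == '.') (pvRle p rest) := by
  obtain ⟨h, t, hE⟩ := List.exists_cons_of_ne_nil (pvRle_ne_nil p rest)
  simp only [pvRowB, pvBwdFwd_spec, hE, List.headI, List.tail, pvAltOut]
  have e1 : ∀ x : Int, 1 + x - 1 = x := fun x => by ring
  cases hv : (p == '.') <;> simp [e1]

theorem pvRow_eq (t : List Char) : pvRowA t = pvRowB t := by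
  cases t with
  | nil => rfl
  | cons p rest => rw [pvRowA_eq_altOut, pvRowB_eq_altOut]

-- ===== VERDICT (by name: the statement is the Claim_ definition above) =====
theorem len_count_spec : Claim_equal_len_count := by
  intro S _ _
  unfold Spec_len_count len_count len_count_alt
  exact List.map_congr_left (fun s _ => pvRow_eq _)
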